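-- pv_equiv track=rewrite | github.com/EC127/CITS1401-Python | exam2.py | dec_trend
-- ===== SOURCE A (Python) =====
-- def dec_trend(data):
--     max = data[0]
--     result=[]
--     result.append(max)
--     for num in data:
--         if num == max:
--             continue
--         elif num < max:
--             result.append(num)
--             max = num
--         else:
--             continue
--     return result
-- ===== SOURCE B (Python) =====
-- from itertools import accumulate
--
-- def dec_trend(data):
--     mins = list(accumulate(data, min))
--     result = [mins[0]]
--     for m in mins:
--         if m != result[-1]:
--             result.append(m)
--     return result
-- ===== Notes on version B (the rewrite author's own statement) =====
-- stated objective: alternative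
-- what changed: Replaces A's single fused loop tracking a running minimum with two passes: a prefix-minimum table built by itertools.accumulate, then a consecutive-dedup pass over that table.
import Mathlib
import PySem

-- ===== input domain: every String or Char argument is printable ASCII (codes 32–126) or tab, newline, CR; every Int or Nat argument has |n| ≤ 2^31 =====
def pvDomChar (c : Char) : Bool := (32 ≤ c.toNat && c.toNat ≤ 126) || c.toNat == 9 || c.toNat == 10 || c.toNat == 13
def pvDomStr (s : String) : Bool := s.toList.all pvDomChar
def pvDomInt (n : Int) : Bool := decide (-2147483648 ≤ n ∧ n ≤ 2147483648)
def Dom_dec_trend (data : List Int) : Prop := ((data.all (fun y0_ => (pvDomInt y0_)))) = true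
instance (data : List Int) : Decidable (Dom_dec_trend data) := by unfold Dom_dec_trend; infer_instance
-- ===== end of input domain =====

-- B replaces A's fused running-minimum loop with a prefix-minimum pass plus a consecutive-dedup pass (alternative decomposition, same cost).

-- ===== PORT A =====
-- A's loop: state = (result, max); appends num when num < max.
def dec_trend (data : List Int) : List Int :=
  match PySem.List.pyGet? data 0 with
  | none => []   -- data[0] raises IndexError; excluded by Pre_
  | some m0 =>
    (data.foldl (fun (st : List Int × Int) num =>
      if num = st.2 then st
      else if num < st.2 then (st.1 ++ [num], num)
      else st) ([m0], m0)).1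

-- ===== PORT B =====
-- helper for itertools.accumulate(data, min): the running-minimum table
def pvAccMinFrom (m : Int) : List Int → List Int
  | [] => []
  | x :: xs => (min m x) :: pvAccMinFrom (min m x) xs

def pvAccMin : List Int → List Int
  | [] => []
  | x :: xs => x :: pvAccMinFrom x xs

def dec_trend_alt (data : List Int) : List Int :=
  let mins := pvAccMin data
  match PySem.List.pyGet? mins 0 with
  | none => []   -- mins[0] raises IndexError; excluded by Pre_
  | some m0 =>
    mins.foldl (fun result m =>
      if PySem.List.pyGet? result (-1) ≠ some m then result ++ [m] else result) [m0]

-- ===== PRECONDITION & SPEC =====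
-- Pre_ excludes only the empty list, on which both Pythons raise IndexError.
def Pre_dec_trend (data : List Int) : Prop := data ≠ []
instance (data : List Int) : Decidable (Pre_dec_trend data) := by unfold Pre_dec_trend; infer_instance
def pvWitness_dec_trend : List Int := ([5, 3, 4, 1])
def Spec_dec_trend (data : List Int) (out : List Int) : Prop := out = dec_trend_alt data
instance (data : List Int) (out : List Int) : Decidable (Spec_dec_trend data out) := by unfold Spec_dec_trend; infer_instance

-- ===== CLAIM (what is proved, stated in full; the proofs are below) =====
def Claim_equal_dec_trend : Prop := ∀ (data : List Int), Dom_dec_trend data → Pre_dec_trend data → Spec_dec_trend data (dec_trend data)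

-- ===== LEMMAS AND PROOFS =====

-- core invariant: A's fold over xs from (res, m) equals B's dedup fold over the
-- running-min table of xs (seeded with m), provided the last element of res is m.
theorem pv_core (xs : List Int) : ∀ (res : List Int) (m : Int),
    PySem.List.pyGet? res (-1) = some m →
    (xs.foldl (fun (st : List Int × Int) num =>
      if num = st.2 then st
      else if num < st.2 then (st.1 ++ [num], num)
      else st) (res, m)).1
    = (pvAccMinFrom m xs).foldl (fun result mm =>
        if PySem.List.pyGet? result (-1) ≠ some mm then result ++ [mm] else result) res := by
  induction xs with
  | nil => intro res m _; simp [pvAccMinFrom]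
  | cons x xs ih =>
    intro res m hlast
    simp only [List.foldl_cons, pvAccMinFrom]
    by_cases hx : x = m
    · subst hx
      simpa [hlast, min_self] using ih res x hlast
    · by_cases hlt : x < m
      · rw [if_neg hx, if_pos hlt]
        have hmin : min m x = x := by omega
        rw [hmin]
        have hne : PySem.List.pyGet? res (-1) ≠ some x := by
          rw [hlast]; simpa using fun h => hx h.symm
        rw [if_pos hne]
        exact ih (res ++ [x]) x (by simp [PySem.List.pyGet?_neg_one_append_singleton])
      · rw [if_neg hx, if_neg hlt]
        have hmin : min m x = m := by omega
        rw [hmin, hlast, if_neg (by simp)]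
        exact ih res m hlast

-- ===== VERDICT (by name: the statement is the Claim_ definition above) =====
theorem dec_trend_spec : Claim_equal_dec_trend := by
  intro data _ hpre
  unfold Spec_dec_trend dec_trend dec_trend_alt
  match data with
  | [] => exact absurd rfl hpre
  | x :: xs =>
    have h1 : PySem.List.pyGet? ([x] : List Int) (-1) = some x := by
      simpa using PySem.List.pyGet?_neg_one_append_singleton (xs := ([] : List Int)) (x := x)
    simpa [pvAccMin, h1] using pv_core xs [x] x h1
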